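-- pv_equiv track=rewrite | github.com/WordPress/openverse | catalog/dags/providers/provider_api_scripts/science_museum.py | _get_year_ranges
-- ===== SOURCE A (Python) =====
-- def _get_year_ranges(final_year: int) -> list[tuple[int, int]]:
--     """
--     Get the year ranges based on a final year.
--
--     The Science Museum API currently raises a 400 when attempting to access
--     any page number higher than 50
--     (<https://github.com/TheScienceMuseum/collectionsonline/issues/1470>).
--
--     To avoid this, we ingest data for small ranges of years at a time,
--     in order to split the data into batches less than 50 pages each.
--     Because more recent data is more numerous, the length of the year
--     ranges decreases as they get closer to the current day.
--     """
--     # Start with some very large ranges for old data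
--     year_ranges = [
--         (0, 200),
--         (200, 1500),
--         (1500, 1750),
--     ]
--     # Add a range for every 25 years between 1750 and 1825
--     year_ranges.extend([(x, x + 25) for x in range(1750, 1825, 25)])
--     # Add a range for every 10 years between 1825 and 1925
--     year_ranges.extend([(x, x + 10) for x in range(1825, 1925, 10)])
--     # Add a range for every 5 years between 1925 and 'next year'
--     # relative to when the DAG is being run.
--     year_ranges.extend(
--         [(x, min(x + 5, final_year)) for x in range(1925, final_year, 5)]
--     )
--     return [{"date[from]": from_, "date[to]": to_} for from_, to_ in year_ranges]
-- ===== SOURCE B (Python) =====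
-- def _get_year_ranges(final_year: int) -> list[tuple[int, int]]:
--     # Boundary-list formulation: build the sorted list of cut points once
--     # (each endpoint computed a single time), then pair consecutive boundaries.
--     bounds = [0, 200, 1500, 1750, 1775, 1800, 1825]
--     bounds += range(1835, 1926, 10)
--     if final_year > 1925:
--         bounds += range(1930, final_year, 5)
--         bounds.append(final_year)
--     return [{"date[from]": a, "date[to]": b} for a, b in zip(bounds, bounds[1:])]
-- ===== Notes on version B (the rewrite author's own statement) =====
-- stated objective: alternative
-- what changed: Instead of building a list of (from,to) interval pairs from a literal list plus three separate range-comprehensions, B computes the sorted list of boundary cut points once (appending final_year as the last cut when needed) and derives every interval by zipping the boundary list with its own tail, so each endpoint is produced exactly once and no min-clipping per element is needed.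
import Mathlib
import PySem

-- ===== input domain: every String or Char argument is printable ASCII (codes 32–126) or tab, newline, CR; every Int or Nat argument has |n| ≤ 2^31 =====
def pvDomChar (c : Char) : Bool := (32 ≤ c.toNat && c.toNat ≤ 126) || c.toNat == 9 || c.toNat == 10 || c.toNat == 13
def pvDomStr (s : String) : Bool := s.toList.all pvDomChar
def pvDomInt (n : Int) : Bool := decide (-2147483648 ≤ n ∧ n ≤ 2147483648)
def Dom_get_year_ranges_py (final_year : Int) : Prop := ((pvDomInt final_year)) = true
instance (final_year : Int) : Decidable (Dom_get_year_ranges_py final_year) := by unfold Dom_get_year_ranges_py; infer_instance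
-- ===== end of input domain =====

-- B replaces A's interval-pair construction (literal list + three range-comprehensions with
-- per-element min-clipping) by computing the boundary cut points once and zipping the boundary
-- list with its own tail (alternative decomposition; same cost).


-- ===== PORT A =====
def get_year_ranges_py (final_year : Int) : List (List (String × Int)) :=
  let year_ranges : List (Int × Int) := [(0, 200), (200, 1500), (1500, 1750)]
  let year_ranges := year_ranges ++ (PySem.List.pyRange 1750 1825 25).map (fun x => (x, x + 25))
  let year_ranges := year_ranges ++ (PySem.List.pyRange 1825 1925 10).map (fun x => (x, x + 10))
  let year_ranges := year_ranges ++ (PySem.List.pyRange 1925 final_year 5).map (fun x => (x, min (x + 5) final_year))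
  year_ranges.map (fun p => [("date[from]", p.1), ("date[to]", p.2)])

-- ===== PORT B =====
def get_year_ranges_py_alt (final_year : Int) : List (List (String × Int)) :=
  let bounds : List Int := [0, 200, 1500, 1750, 1775, 1800, 1825]
  let bounds := bounds ++ PySem.List.pyRange 1835 1926 10
  let bounds := if final_year > 1925 then
      (bounds ++ PySem.List.pyRange 1930 final_year 5) ++ [final_year]
    else bounds
  (List.zip bounds (bounds.drop 1)).map (fun p => [("date[from]", p.1), ("date[to]", p.2)])

-- ===== PRECONDITION & SPEC =====
def Spec_get_year_ranges_py (final_year : Int) (out : List (List (String × Int))) : Prop := out = get_year_ranges_py_alt final_year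
instance (final_year : Int) (out : List (List (String × Int))) : Decidable (Spec_get_year_ranges_py final_year out) := by unfold Spec_get_year_ranges_py; infer_instance

-- ===== CLAIM (what is proved, stated in full; the proofs are below) =====
def Claim_equal_get_year_ranges_py : Prop := ∀ (final_year : Int), Dom_get_year_ranges_py final_year → Spec_get_year_ranges_py final_year (get_year_ranges_py final_year)

-- ===== LEMMAS AND PROOFS =====

-- step-5 range unfolding lemmas
theorem pr5_nil {a b : Int} (h : b ≤ a) : PySem.List.pyRange a b 5 = [] := by
  rw [PySem.List.pyRange_of_pos a b (by norm_num)]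
  simp [show ¬ a < b by omega]

theorem pr5_cons {a b : Int} (h : a < b) :
    PySem.List.pyRange a b 5 = a :: PySem.List.pyRange (a + 5) b 5 := by
  rw [PySem.List.pyRange_of_pos a b (by norm_num),
      PySem.List.pyRange_of_pos (a + 5) b (by norm_num)]
  by_cases h5 : a + 5 < b
  · simp only [if_pos h, if_pos h5]
    have hd : (b - a + 5 - 1) / 5 = (b - (a + 5) + 5 - 1) / 5 + 1 := by
      have := Int.add_mul_ediv_right (b - (a + 5) + 5 - 1) 1 (show (5:Int) ≠ 0 by norm_num)
      have he : b - a + 5 - 1 = b - (a + 5) + 5 - 1 + 1 * 5 := by ring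
      rw [he, this]
    have hpos : 0 ≤ (b - (a + 5) + 5 - 1) / 5 := by
      apply Int.ediv_nonneg <;> omega
    rw [hd, Int.toNat_add hpos (by norm_num)]
    simp only [Int.toNat_one]
    rw [List.range_succ_eq_map, List.map_cons, List.map_map]
    refine congrArg₂ _ (by norm_num) (List.map_congr_left (fun k _ => ?_))
    simp only [Function.comp_apply]
    push_cast; ring
  · simp only [if_pos h, if_neg h5]
    have h1 : (b - a + 5 - 1) / 5 = 1 := by
      have : b - a + 5 - 1 = (b - a - 1) + 1 * 5 := by ring
      rw [this, Int.add_mul_ediv_right _ _ (show (5:Int) ≠ 0 by norm_num)]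
      have : (b - a - 1) / 5 = 0 := by
        apply Int.ediv_eq_zero_of_lt <;> omega
      omega
    rw [h1]
    norm_num [List.range_one]

-- zipping a boundary chain 'a :: (pyRange (a+5) fy 5 ++ [fy])' with its tail yields exactly
-- A's clipped interval pairs over pyRange a fy 5.
theorem zip_chain (fy : Int) : ∀ (n : Nat) (a : Int), a < fy → (fy - a).toNat ≤ n →
    List.zip (a :: (PySem.List.pyRange (a + 5) fy 5 ++ [fy]))
             (PySem.List.pyRange (a + 5) fy 5 ++ [fy])
      = (PySem.List.pyRange a fy 5).map (fun x => (x, min (x + 5) fy)) := by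
  intro n
  induction n with
  | zero => intro a h hn; omega
  | succ m ih =>
    intro a h hn
    by_cases h5 : a + 5 < fy
    · rw [pr5_cons h5, pr5_cons h, List.cons_append, List.zip_cons_cons,
          ih (a + 5) h5 (by omega), List.map_cons]
      have : min (a + 5) fy = a + 5 := by omega
      rw [this]
    · rw [pr5_nil (by omega), pr5_cons h, pr5_nil (show fy ≤ a + 5 by omega)]
      simp only [List.nil_append, List.map_cons, List.map_nil]
      have : min (a + 5) fy = fy := by omega
      simp [List.zip, this]

-- canonical forms of the two ports
def pvConstPrefix : List (List (String × Int)) :=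
  ([(0, 200), (200, 1500), (1500, 1750), (1750, 1775), (1775, 1800), (1800, 1825),
    (1825, 1835), (1835, 1845), (1845, 1855), (1855, 1865), (1865, 1875), (1875, 1885),
    (1885, 1895), (1895, 1905), (1905, 1915), (1915, 1925)] : List (Int × Int)).map
    (fun p => [("date[from]", p.1), ("date[to]", p.2)])

theorem pvA_eq (fy : Int) : get_year_ranges_py fy =
    pvConstPrefix ++ (PySem.List.pyRange 1925 fy 5).map
      (fun x => [("date[from]", x), ("date[to]", min (x + 5) fy)]) := by
  simp only [get_year_ranges_py, List.map_append, List.map_map, List.append_assoc]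
  rw [show (PySem.List.pyRange (1750 : Int) 1825 25).map
        ((fun p => [(("date[from]" : String), p.1), ("date[to]", p.2)]) ∘ fun x => (x, x + 25))
      = [[("date[from]", 1750), ("date[to]", 1775)], [("date[from]", 1775), ("date[to]", 1800)],
         [("date[from]", 1800), ("date[to]", 1825)]] from by decide,
      show (PySem.List.pyRange (1825 : Int) 1925 10).map
        ((fun p => [(("date[from]" : String), p.1), ("date[to]", p.2)]) ∘ fun x => (x, x + 10))
      = [[("date[from]", 1825), ("date[to]", 1835)], [("date[from]", 1835), ("date[to]", 1845)],
         [("date[from]", 1845), ("date[to]", 1855)], [("date[from]", 1855), ("date[to]", 1865)],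
         [("date[from]", 1865), ("date[to]", 1875)], [("date[from]", 1875), ("date[to]", 1885)],
         [("date[from]", 1885), ("date[to]", 1895)], [("date[from]", 1895), ("date[to]", 1905)],
         [("date[from]", 1905), ("date[to]", 1915)], [("date[from]", 1915), ("date[to]", 1925)]] from by decide]
  rfl

theorem pvB_eq (fy : Int) : get_year_ranges_py_alt fy =
    pvConstPrefix ++ (PySem.List.pyRange 1925 fy 5).map
      (fun x => [("date[from]", x), ("date[to]", min (x + 5) fy)]) := by
  simp only [get_year_ranges_py_alt]
  rw [show PySem.List.pyRange (1835 : Int) 1926 10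
      = [1835, 1845, 1855, 1865, 1875, 1885, 1895, 1905, 1915, 1925] from by decide]
  by_cases h : fy > 1925
  · simp only [if_pos h]
    rw [show ([0, 200, 1500, 1750, 1775, 1800, 1825] ++
          [(1835 : Int), 1845, 1855, 1865, 1875, 1885, 1895, 1905, 1915, 1925]
          ++ PySem.List.pyRange 1930 fy 5) ++ [fy]
        = [0, 200, 1500, 1750, 1775, 1800, 1825, 1835, 1845, 1855, 1865, 1875, 1885, 1895, 1905, 1915]
          ++ (1925 :: (PySem.List.pyRange 1930 fy 5 ++ [fy])) from by simp]
    simp only [List.cons_append, List.drop_succ_cons, List.drop_zero, List.zip_cons_cons,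
      List.nil_append, List.map_cons]
    rw [show ((1930 : Int)) = 1925 + 5 from by norm_num] at *
    rw [zip_chain fy (fy - 1925).toNat 1925 h (le_refl _)]
    simp [pvConstPrefix, pr5_cons h, List.map_map, Function.comp]
  · simp only [if_neg h]
    rw [pr5_nil (show fy ≤ 1925 by omega)]
    simp only [List.map_nil, List.append_nil]
    decide

-- ===== VERDICT (by name: the statement is the Claim_ definition above) =====
theorem get_year_ranges_py_spec : Claim_equal_get_year_ranges_py := by
  intro fy _
  unfold Spec_get_year_ranges_py
  rw [pvA_eq, pvB_eq]
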